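-- pv_equiv track=rewrite | github.com/MrBrantCode/unitest_baseline | mut_generate/mist_train_cf/cf_54017/solution.py | odd_count_elements
-- ===== SOURCE A (Python) =====
-- def odd_count_elements(list1, list2):
--     counts = {}
--     for i in list1 + list2:
--         if i in counts:
--             counts[i] += 1
--         else:
--             counts[i] = 1
--
--     odds = [i for i in counts if counts[i] % 2 != 0]
--
--     # Manually implementing a bubble sort since we can't use built-in sort functions
--     for i in range(len(odds)):
--         for j in range(len(odds) - 1):
--             if odds[j] < odds[j + 1]:
--                 odds[j], odds[j + 1] = odds[j + 1], odds[j]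
--
--     return odds
-- ===== SOURCE B (Python) =====
-- def odd_count_elements(list1, list2):
--     s = sorted(list1 + list2, reverse=True)
--     res = []
--     cur = None
--     runlen = 0
--     for x in s:
--         if x == cur:
--             runlen += 1
--         else:
--             if runlen % 2 == 1:
--                 res.append(cur)
--             cur = x
--             runlen = 1
--     if runlen % 2 == 1:
--         res.append(cur)
--     return res
-- ===== Notes on version B (the rewrite author's own statement) =====
-- stated objective: faster
-- what changed: Replaces the counting dict plus O(k^2) hand-written bubble sort with one sorted(list1+list2, reverse=True) call followed by a single run-length sweep that keeps values whose consecutive run is odd.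
import Mathlib
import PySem

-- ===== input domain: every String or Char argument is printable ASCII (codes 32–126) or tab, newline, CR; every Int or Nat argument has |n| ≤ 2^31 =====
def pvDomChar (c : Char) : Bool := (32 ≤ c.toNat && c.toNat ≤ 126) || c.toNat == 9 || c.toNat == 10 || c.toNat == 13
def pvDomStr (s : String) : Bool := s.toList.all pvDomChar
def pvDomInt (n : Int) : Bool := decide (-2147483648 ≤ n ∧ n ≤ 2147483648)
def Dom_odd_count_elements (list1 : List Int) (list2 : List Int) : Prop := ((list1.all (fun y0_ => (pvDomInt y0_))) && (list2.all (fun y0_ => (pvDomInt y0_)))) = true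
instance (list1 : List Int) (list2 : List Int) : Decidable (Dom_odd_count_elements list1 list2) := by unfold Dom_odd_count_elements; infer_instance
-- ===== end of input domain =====

-- B replaces A's counting dict + hand-written O(k^2) bubble sort by one call to
-- sorted(list1+list2, reverse=True) followed by a single run-length sweep (objective: faster).

-- ===== PORT A =====
-- the counting loop body: if i in counts: counts[i] += 1 else: counts[i] = 1
def oceStep (d : PySem.Dict Int Int) (i : Int) : PySem.Dict Int Int :=
  if d.contains i then d.modify i 0 (· + 1) else d.insert i 1

-- one bubble-sort step: if odds[j] < odds[j+1]: odds[j], odds[j+1] = odds[j+1], odds[j]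
-- (the indices j, j+1 produced by range(len(odds)-1) are always in range, so the
-- catch-all branch of the match on pyGet? is unreachable)
def oceSwap (acc : List Int) (j : Int) : List Int :=
  match PySem.List.pyGet? acc j, PySem.List.pyGet? acc (j + 1) with
  | some x, some y => if x < y then (acc.set j.toNat y).set (j + 1).toNat x else acc
  | _, _ => acc

-- the inner loop: for j in range(len(odds) - 1): …
def oceInner (l : List Int) : List Int :=
  (PySem.List.pyRange 0 ((l.length : Int) - 1) 1).foldl oceSwap l

def odd_count_elements (list1 : List Int) (list2 : List Int) : List Int :=
  let counts := (list1 ++ list2).foldl oceStep PySem.Dict.empty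
  let odds := counts.keys.filter (fun i => PySem.Int.mod (counts.getD i 0) 2 != 0)
  (PySem.List.pyRange 0 (odds.length : Int) 1).foldl (fun acc _ => oceInner acc) odds

-- ===== PORT B =====
-- loop body of Source B's sweep; state = (res, cur, runlen).  Python's `x == cur` with
-- cur = None is False, hence the Option equality test.  `cur` is appended only when
-- runlen % 2 == 1, and then cur is an int (some _), so `.getD 0` is exact.
def oceAltStep (st : List Int × Option Int × Int) (x : Int) : List Int × Option Int × Int :=
  if some x = st.2.1 then (st.1, st.2.1, st.2.2 + 1)
  else ((if PySem.Int.mod st.2.2 2 = 1 then st.1 ++ [st.2.1.getD 0] else st.1), some x, 1)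

-- the flush after the loop: if runlen % 2 == 1: res.append(cur)
def oceAltFlush (st : List Int × Option Int × Int) : List Int :=
  if PySem.Int.mod st.2.2 2 = 1 then st.1 ++ [st.2.1.getD 0] else st.1

def odd_count_elements_alt (list1 : List Int) (list2 : List Int) : List Int :=
  let s := PySem.List.sorted (list1 ++ list2) (fun x => x) true
  oceAltFlush (s.foldl oceAltStep ([], none, 0))

-- ===== PRECONDITION & SPEC =====
def Spec_odd_count_elements (list1 : List Int) (list2 : List Int) (out : List Int) : Prop := out = odd_count_elements_alt list1 list2
instance (list1 : List Int) (list2 : List Int) (out : List Int) : Decidable (Spec_odd_count_elements list1 list2 out) := by unfold Spec_odd_count_elements; infer_instance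

-- ===== CLAIM (what is proved, stated in full; the proofs are below) =====
def Claim_equal_odd_count_elements : Prop := ∀ (list1 : List Int) (list2 : List Int), Dom_odd_count_elements list1 list2 → Spec_odd_count_elements list1 list2 (odd_count_elements list1 list2)

-- ===== LEMMAS AND PROOFS =====


theorem oceFold_getD (l : List Int) (d : PySem.Dict Int Int) (v : Int) :
    (l.foldl oceStep d).getD v 0 = d.getD v 0 + l.count v := by
  induction l generalizing d with
  | nil => simp
  | cons x t ih =>
    simp only [List.foldl_cons, ih, List.count_cons]
    unfold oceStep
    by_cases hc : (d.contains x : Bool) = true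
    · simp only [hc, if_true, PySem.Dict.getD_modify]
      by_cases hv : v = x
      · subst hv; simp; ring
      · simp [hv, Ne.symm hv]
    · simp only [hc, if_false, Bool.false_eq_true, PySem.Dict.getD_insert]
      by_cases hv : v = x
      · subst hv
        rw [PySem.Dict.getD_of_not_contains _ _ (by simpa using hc)]
        simp; omega
      · simp [hv, Ne.symm hv]

theorem oceFold_mem_keys (l : List Int) (d : PySem.Dict Int Int) (v : Int) :
    v ∈ (l.foldl oceStep d).keys ↔ v ∈ d.keys ∨ v ∈ l := by
  induction l generalizing d with
  | nil => simp
  | cons x t ih =>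
    simp only [List.foldl_cons, ih, List.mem_cons]
    unfold oceStep
    by_cases hc : (d.contains x : Bool) = true
    · have hx : x ∈ d.keys := (PySem.Dict.contains_iff_mem_keys _ _).1 hc
      simp only [hc, if_true, PySem.Dict.keys_modify, PySem.Dict.mem_keys_insert]
      tauto
    · simp only [hc, if_false, Bool.false_eq_true, PySem.Dict.mem_keys_insert]
      tauto

theorem oceFold_nodup_keys (l : List Int) (d : PySem.Dict Int Int) (h : d.keys.Nodup) :
    (l.foldl oceStep d).keys.Nodup := by
  induction l generalizing d with
  | nil => exact h
  | cons x t ih =>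
    simp only [List.foldl_cons]
    apply ih
    unfold oceStep
    by_cases hc : (d.contains x : Bool) = true
    · rw [if_pos hc]
      have := PySem.Dict.keys_modify d x (0:Int) (· + 1)
      rw [show (d.modify x 0 (· + 1)).keys.Nodup ↔ (d.insert x ((d.getD x 0) + 1)).keys.Nodup by rw [this]]
      exact PySem.Dict.nodup_keys_insert _ _ _ h
    · simp only [hc, if_false, Bool.false_eq_true]
      exact PySem.Dict.nodup_keys_insert _ _ _ h

def bpass : List Int → List Int
  | [] => []
  | [x] => [x]
  | x :: y :: t => if x < y then y :: bpass (x :: t) else x :: bpass (y :: t)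

theorem bpass_perm (l : List Int) : (bpass l).Perm l := by
  fun_induction bpass with
  | case1 => rfl
  | case2 x => rfl
  | case3 x y t h ih =>
    exact (ih.cons y).trans (List.Perm.swap x y t)
  | case4 x y t h ih =>
    exact ih.cons x

theorem bpass_of_sorted (l : List Int) (h : l.Pairwise (· ≥ ·)) : bpass l = l := by
  fun_induction bpass with
  | case1 => rfl
  | case2 x => rfl
  | case3 x y t hxy ih =>
    exact absurd (List.rel_of_pairwise_cons h (List.mem_cons_self)) (by omega)
  | case4 x y t hxy ih =>
    rw [ih (List.Pairwise.tail h)]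

theorem bpass_last (l : List Int) (h : l ≠ []) :
    ∃ a c, bpass l = a ++ [c] ∧ ∀ x ∈ a, c ≤ x := by
  fun_induction bpass with
  | case1 => exact absurd rfl h
  | case2 x => exact ⟨[], x, rfl, by simp⟩
  | case3 x y t hxy ih =>
    obtain ⟨a, c, he, hle⟩ := ih (by simp)
    have hc : c ∈ x :: t := (bpass_perm (x :: t)).subset (he ▸ (by simp))
    have hcx : c ≤ x := by
      have hx : x ∈ a ++ [c] := (he ▸ (bpass_perm (x :: t)).symm).subset List.mem_cons_self
      rcases List.mem_append.1 hx with h1 | h1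
      · exact hle x h1
      · simp at h1; omega
    exact ⟨y :: a, c, by simp [he], by
      intro z hz
      rcases List.mem_cons.1 hz with rfl | hz
      · omega
      · exact hle z hz⟩
  | case4 x y t hxy ih =>
    obtain ⟨a, c, he, hle⟩ := ih (by simp)
    have hc : c ∈ y :: t := (bpass_perm (y :: t)).subset (he ▸ (by simp))
    have hcy : c ≤ y := by
      have hy : y ∈ a ++ [c] := (he ▸ (bpass_perm (y :: t)).symm).subset List.mem_cons_self
      rcases List.mem_append.1 hy with h1 | h1
      · exact hle y h1
      · simp at h1; omega
    exact ⟨x :: a, c, by simp [he], by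
      intro z hz
      rcases List.mem_cons.1 hz with rfl | hz
      · omega
      · exact hle z hz⟩

theorem bpass_append_aux (b : List Int) (hb : b.Pairwise (· ≥ ·)) (s : List Int) :
    ∀ x : Int, (∀ w ∈ x :: s, ∀ y ∈ b, y ≤ w) →
    ∃ a' c, bpass ((x :: s) ++ b) = a' ++ c :: b ∧ bpass (x :: s) = a' ++ [c] := by
  induction s with
  | nil =>
    intro x hdom
    match b with
    | [] => exact ⟨[], x, by simp [bpass], by simp [bpass]⟩
    | y :: u =>
      have hxy : ¬ x < y := by have := hdom x (by simp) y (by simp); omega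
      refine ⟨[], x, ?_, by simp [bpass]⟩
      simp only [List.cons_append, List.nil_append, bpass, if_neg hxy]
      rw [bpass_of_sorted _ hb]
  | cons z s' ih =>
    intro x hdom
    by_cases hxz : x < z
    · obtain ⟨a', c, h1, h2⟩ := ih x (by
        intro w hw y hy
        apply hdom w _ y hy
        rcases List.mem_cons.1 hw with rfl | hw'
        · exact List.mem_cons_self
        · simp [hw'])
      refine ⟨z :: a', c, ?_, ?_⟩
      · show bpass (x :: z :: (s' ++ b)) = _
        rw [show bpass (x :: z :: (s' ++ b)) = z :: bpass (x :: (s' ++ b)) by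
          simp [bpass, if_pos hxz]]
        rw [show x :: (s' ++ b) = (x :: s') ++ b from rfl, h1]
        simp
      · rw [show bpass (x :: z :: s') = z :: bpass (x :: s') by simp [bpass, if_pos hxz], h2]
        simp
    · obtain ⟨a', c, h1, h2⟩ := ih z (by
        intro w hw y hy
        apply hdom w _ y hy
        simp at hw ⊢; tauto)
      refine ⟨x :: a', c, ?_, ?_⟩
      · show bpass (x :: z :: (s' ++ b)) = _
        rw [show bpass (x :: z :: (s' ++ b)) = x :: bpass (z :: (s' ++ b)) by
          simp [bpass, if_neg hxz]]
        rw [show z :: (s' ++ b) = (z :: s') ++ b from rfl, h1]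
        simp
      · rw [show bpass (x :: z :: s') = x :: bpass (z :: s') by simp [bpass, if_neg hxz], h2]
        simp

theorem bpass_append (a b : List Int) (ha : a ≠ []) (hb : b.Pairwise (· ≥ ·))
    (hdom : ∀ x ∈ a, ∀ y ∈ b, y ≤ x) :
    ∃ a' c, bpass (a ++ b) = a' ++ c :: b ∧ bpass a = a' ++ [c] := by
  match a with
  | [] => exact absurd rfl ha
  | x :: s => exact bpass_append_aux b hb s x hdom

def BQ (k : Nat) (l : List Int) : Prop :=
  ∃ a b, l = a ++ b ∧ (a = [] ∨ k ≤ b.length) ∧ b.Pairwise (· ≥ ·) ∧ ∀ x ∈ a, ∀ y ∈ b, y ≤ x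

theorem BQ_step (k : Nat) (l : List Int) (h : BQ k l) : BQ (k + 1) (bpass l) := by
  obtain ⟨a, b, rfl, hk, hb, hdom⟩ := h
  by_cases ha : a = []
  · subst ha
    simp only [List.nil_append] at *
    rw [bpass_of_sorted b hb]
    exact ⟨[], b, by simp, Or.inl rfl, hb, by simp⟩
  · obtain ⟨a', c, h1, h2⟩ := bpass_append a b ha hb hdom
    obtain ⟨a'', c'', h3, h4⟩ := bpass_last a ha
    have heq : a' = a'' ∧ c = c'' := by
      have := h2.symm.trans h3
      constructor
      · have := congrArg List.dropLast this; simpa using this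
      · have := congrArg (·.getLast?) this; simpa using this
    obtain ⟨rfl, rfl⟩ := heq
    have hsub : ∀ z ∈ a' ++ [c], z ∈ a := fun z hz => (h2 ▸ bpass_perm a).subset hz
    refine ⟨a', c :: b, h1, Or.inr ?_, ?_, ?_⟩
    · rcases hk with h | h
      · exact absurd h ha
      · simp; omega
    · exact List.Pairwise.cons (fun y hy => hdom c (hsub c (by simp)) y hy) hb
    · intro x hx y hy
      rcases List.mem_cons.1 hy with rfl | hy'
      · exact h4 x hx
      · exact hdom x (hsub x (by simp [hx])) y hy'

theorem bpass_iter_perm (n : Nat) (l : List Int) : (bpass^[n] l).Perm l := by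
  induction n with
  | zero => simp
  | succ n ih =>
    rw [Function.iterate_succ_apply']
    exact (bpass_perm _).trans ih

theorem bpass_iter_sorted (n : Nat) (l : List Int) (h : l.length ≤ n) :
    (bpass^[n] l).Pairwise (· ≥ ·) := by
  have hbq : ∀ m : Nat, BQ m (bpass^[m] l) := by
    intro m
    induction m with
    | zero => exact ⟨l, [], by simp, Or.inr (by simp), by simp, by simp⟩
    | succ m ih =>
      rw [Function.iterate_succ_apply']
      exact BQ_step m _ ih
  obtain ⟨a, b, he, hk, hb, hdom⟩ := hbq n
  have hlen : (bpass^[n] l).length = l.length := (bpass_iter_perm n l).length_eq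
  rcases hk with rfl | hkb
  · simpa using he ▸ hb
  · have : a = [] := by
      have := congrArg List.length he
      rw [hlen] at this
      simp at this
      have : a.length = 0 := by omega
      exact List.eq_nil_of_length_eq_zero this
    subst this
    simpa using he ▸ hb


theorem oceSwap_at (a : List Int) (x y : Int) (t : List Int) :
    oceSwap (a ++ x :: y :: t) (a.length : Int) =
      if x < y then a ++ y :: x :: t else a ++ x :: y :: t := by
  have h1 : PySem.List.pyGet? (a ++ x :: y :: t) (a.length : Int) = some x := by
    rw [PySem.List.pyGet?_natCast]
    simp
  have h2 : PySem.List.pyGet? (a ++ x :: y :: t) ((a.length : Int) + 1) = some y := by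
    rw [show ((a.length : Int) + 1) = ((a.length + 1 : Nat) : Int) by push_cast; ring,
      PySem.List.pyGet?_natCast]
    rw [List.getElem?_append_right (by omega)]
    simp
  unfold oceSwap
  rw [h1, h2]
  by_cases hxy : x < y
  · simp only [if_pos hxy]
    rw [show ((a.length : Int)).toNat = a.length by omega,
        show ((a.length : Int) + 1).toNat = a.length + 1 by omega]
    rw [List.set_append_right _ _ (by omega), List.set_append_right _ _ (by omega)]
    simp
  · simp [hxy]

theorem oceInner_go (s : List Int) : ∀ (x : Int) (a : List Int),
    (PySem.List.pyRange (a.length : Int) ((a.length : Int) + ((x :: s).length : Int) - 1) 1).foldl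
      oceSwap (a ++ x :: s) = a ++ bpass (x :: s) := by
  induction s with
  | nil =>
    intro x a
    rw [PySem.List.pyRange_one_eq_nil (by simp)]
    simp [bpass]
  | cons y t ih =>
    intro x a
    have hlt : (a.length : Int) < (a.length : Int) + ((x :: y :: t).length : Int) - 1 := by
      simp; omega
    rw [PySem.List.pyRange_one_cons hlt, List.foldl_cons, oceSwap_at]
    by_cases hxy : x < y
    · rw [if_pos hxy]
      have := ih x (a ++ [y])
      rw [show (a ++ [y]) ++ x :: t = a ++ y :: x :: t by simp] at this
      rw [show ((a ++ [y]).length : Int) = (a.length : Int) + 1 by simp] at this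
      rw [show (a.length : Int) + 1 + ((x :: t).length : Int) - 1
            = (a.length : Int) + ((x :: y :: t).length : Int) - 1 by simp; ring] at this
      rw [this]
      simp [bpass, if_pos hxy]
    · rw [if_neg hxy]
      have := ih y (a ++ [x])
      rw [show (a ++ [x]) ++ y :: t = a ++ x :: y :: t by simp] at this
      rw [show ((a ++ [x]).length : Int) = (a.length : Int) + 1 by simp] at this
      rw [show (a.length : Int) + 1 + ((y :: t).length : Int) - 1
            = (a.length : Int) + ((x :: y :: t).length : Int) - 1 by simp; ring] at this
      rw [this]
      simp [bpass, if_neg hxy]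

theorem oceInner_eq_bpass (l : List Int) : oceInner l = bpass l := by
  match l with
  | [] =>
    unfold oceInner
    rw [PySem.List.pyRange_one_eq_nil (by simp)]
    simp [bpass]
  | x :: s =>
    unfold oceInner
    have := oceInner_go s x []
    simpa using this

theorem foldl_const_iterate (r : List Int) (l : List Int) :
    r.foldl (fun acc _ => oceInner acc) l = bpass^[r.length] l := by
  induction r generalizing l with
  | nil => simp
  | cons x t ih =>
    rw [List.foldl_cons, ih, oceInner_eq_bpass, List.length_cons, Function.iterate_succ_apply]


def runs (c m : Int) : List Int → List Int
  | [] => if PySem.Int.mod m 2 = 1 then [c] else []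
  | x :: t => if x = c then runs c (m + 1) t
              else (if PySem.Int.mod m 2 = 1 then [c] else []) ++ runs x 1 t

theorem mod2_eq (a : Int) : PySem.Int.mod a 2 = a % 2 :=
  PySem.Int.mod_eq_emod_of_pos (by omega)

theorem oceAlt_fold_runs (s : List Int) : ∀ (res : List Int) (c m : Int),
    oceAltFlush (s.foldl oceAltStep (res, some c, m)) = res ++ runs c m s := by
  induction s with
  | nil =>
    intro res c m
    simp only [List.foldl_nil, oceAltFlush, runs, mod2_eq, Option.getD_some]
    split_ifs <;> simp
  | cons x t ih =>
    intro res c m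
    rw [List.foldl_cons]
    by_cases hx : x = c
    · subst hx
      rw [show oceAltStep (res, some x, m) x = (res, some x, m + 1) by
        simp [oceAltStep]]
      rw [ih, runs]
      simp
    · rw [show oceAltStep (res, some c, m) x =
          ((if PySem.Int.mod m 2 = 1 then res ++ [c] else res), some x, 1) by
        simp [oceAltStep, hx]]
      rw [ih, runs]
      simp only [if_neg hx, mod2_eq]
      split_ifs <;> simp

theorem runs_mem (t : List Int) : ∀ (c m : Int), 1 ≤ m → t.Pairwise (· ≥ ·) →
    (∀ y ∈ t, y ≤ c) → ∀ v : Int,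
    (v ∈ runs c m t ↔ ((if v = c then m else 0) + (t.count v : Int)) % 2 = 1) := by
  induction t with
  | nil =>
    intro c m hm _ _ v
    rw [runs]
    simp only [mod2_eq]
    by_cases hv : v = c
    · subst hv; simp
    · simp [hv]
  | cons x t' ih =>
    intro c m hm hs hd v
    rw [runs]
    have hsx : t'.Pairwise (· ≥ ·) := hs.tail
    have hdx : ∀ y ∈ t', y ≤ x := fun y hy => List.rel_of_pairwise_cons hs hy
    by_cases hx : x = c
    · subst hx
      rw [if_pos rfl, ih x (m + 1) (by omega) hsx hdx v]
      by_cases hv : v = x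
      · subst hv; simp; ring_nf
      · simp [hv, Ne.symm hv]
    · rw [if_neg hx]
      have hxc : x < c := lt_of_le_of_ne (hd x (by simp)) hx
      have hcnott : c ∉ t' := fun hmem => by have := hdx c hmem; omega
      rw [List.mem_append, ih x 1 (by omega) hsx hdx v]
      simp only [mod2_eq]
      have hc0' : t'.count c = 0 := List.count_eq_zero.2 hcnott
      by_cases hv : v = c
      · subst hv
        simp [hc0', Ne.symm hx, hx]
      · rw [if_neg hv]
        have hnotin : v ∉ (if m % 2 = 1 then [c] else ([] : List Int)) := by
          split_ifs <;> simp [hv]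
        by_cases hvx : v = x
        · subst hvx
          rw [show List.count v (v :: t') = List.count v t' + 1 by simp]
          simp only [if_true]
          constructor
          · rintro (hmem | hmem)
            · exact absurd hmem hnotin
            · push_cast at hmem ⊢; omega
          · intro h
            right
            push_cast at h ⊢; omega
        · simp only [if_neg hvx]
          rw [show List.count v (x :: t') = List.count v t' by simp [Ne.symm hvx]]
          constructor
          · rintro (hmem | hmem)
            · exact absurd hmem hnotin
            · omega
          · intro h
            right
            omega

theorem runs_sorted (t : List Int) : ∀ (c m : Int), 1 ≤ m → t.Pairwise (· ≥ ·) →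
    (∀ y ∈ t, y ≤ c) →
    (runs c m t).Pairwise (· > ·) ∧ ∀ v ∈ runs c m t, v ≤ c := by
  induction t with
  | nil =>
    intro c m hm _ _
    rw [runs]
    split_ifs <;> simp
  | cons x t' ih =>
    intro c m hm hs hd
    rw [runs]
    have hsx : t'.Pairwise (· ≥ ·) := hs.tail
    have hdx : ∀ y ∈ t', y ≤ x := fun y hy => List.rel_of_pairwise_cons hs hy
    by_cases hx : x = c
    · subst hx
      rw [if_pos rfl]
      exact ih x (m + 1) (by omega) hsx hdx
    · rw [if_neg hx]
      have hxc : x < c := lt_of_le_of_ne (hd x (by simp)) hx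
      obtain ⟨hp, hb⟩ := ih x 1 (by omega) hsx hdx
      constructor
      · apply List.pairwise_append.2
        refine ⟨by split_ifs <;> simp, hp, ?_⟩
        intro a ha b hb'
        have ha' : a = c := by split_ifs at ha <;> simp at ha; omega
        subst ha'
        have := hb b hb'
        omega
      · intro v hv
        rcases List.mem_append.1 hv with h | h
        · split_ifs at h <;> simp at h; omega
        · have := hb v h; omega


theorem final_eq (l1 l2 : List Int) : odd_count_elements l1 l2 = odd_count_elements_alt l1 l2 := by
  simp only [odd_count_elements, odd_count_elements_alt]
  set L := l1 ++ l2 with hL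
  set counts := L.foldl oceStep PySem.Dict.empty with hcounts
  set odds := counts.keys.filter (fun i => PySem.Int.mod (counts.getD i 0) 2 != 0) with hodds
  -- A-side facts
  have hgetD : ∀ v : Int, counts.getD v 0 = (L.count v : Int) := by
    intro v
    rw [hcounts, oceFold_getD]
    simp
  have hodds_nodup : odds.Nodup := by
    apply List.Nodup.filter
    exact oceFold_nodup_keys L _ (by simp [PySem.Dict.keys_empty])
  have hodds_mem : ∀ v : Int, v ∈ odds ↔ L.count v % 2 = 1 := by
    intro v
    rw [hodds, List.mem_filter]
    rw [show (fun i => PySem.Int.mod (counts.getD i 0) 2 != 0) v = true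
        ↔ L.count v % 2 = 1 by
      simp only [bne_iff_ne, ne_eq, hgetD, mod2_eq]
      rw [show ((List.count v L : Nat) : Int) % 2 = ((List.count v L % 2 : Nat) : Int) from
        (Int.natCast_mod _ _).symm]
      omega]
    constructor
    · rintro ⟨_, h⟩; exact h
    · intro h
      refine ⟨?_, h⟩
      rw [oceFold_mem_keys]
      right
      rw [← List.count_pos_iff]
      omega
  -- A result
  have hAiter : (PySem.List.pyRange 0 (odds.length : Int) 1).foldl
      (fun acc _ => oceInner acc) odds = bpass^[odds.length] odds := by
    rw [foldl_const_iterate, PySem.List.length_pyRange_one]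
    simp
  have hA_perm : (bpass^[odds.length] odds).Perm odds := bpass_iter_perm _ _
  have hA_sorted : (bpass^[odds.length] odds).Pairwise (· ≥ ·) :=
    bpass_iter_sorted _ _ (le_refl _)
  -- B side
  have hs_pair : (PySem.List.sorted L (fun x => x) true).Pairwise (· ≥ ·) :=
    PySem.List.sorted_pairwise_rev L (fun x => x)
  have hs_count : ∀ v : Int, (PySem.List.sorted L (fun x => x) true).count v = L.count v :=
    fun v => (PySem.List.sorted_perm L (fun x => x) true).count_eq v
  have hs_perm : (PySem.List.sorted L (fun x => x) true).Perm L :=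
    PySem.List.sorted_perm L (fun x => x) true
  rw [hAiter]
  cases hsm : PySem.List.sorted L (fun x => x) true with
  | nil =>
    have hLnil : L = [] := by
      rw [hsm] at hs_perm
      exact hs_perm.symm.eq_nil
    have : odds = [] := by
      rcases List.eq_nil_or_concat odds with h | ⟨a, b, h⟩
      · exact h
      · exfalso
        have hb : b ∈ odds := by simp [h]
        rw [hodds_mem, hLnil] at hb
        simp at hb
    rw [this]
    simp [oceAltFlush]
  | cons x t =>
    have hstep : oceAltStep ([], none, 0) x = ([], some x, 1) := by
      simp [oceAltStep]
    rw [List.foldl_cons, hstep, oceAlt_fold_runs, List.nil_append]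
    have hxt_pair := hsm ▸ hs_pair
    have hst : t.Pairwise (· ≥ ·) := hxt_pair.tail
    have hdt : ∀ y ∈ t, y ≤ x := fun y hy => List.rel_of_pairwise_cons hxt_pair hy
    have hB_mem : ∀ v : Int, v ∈ runs x 1 t ↔ L.count v % 2 = 1 := by
      intro v
      rw [runs_mem t x 1 (by omega) hst hdt v]
      have hc := hs_count v
      rw [hsm] at hc
      by_cases hvx : v = x
      · subst hvx
        rw [show List.count v (v :: t) = List.count v t + 1 by simp] at hc
        simp only [if_true]
        omega
      · rw [show List.count v (x :: t) = List.count v t by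
          simp [Ne.symm hvx]] at hc
        simp only [if_neg hvx]
        omega
    obtain ⟨hB_pair, _⟩ := runs_sorted t x 1 (by omega) hst hdt
    have hB_nodup : (runs x 1 t).Nodup := hB_pair.imp (fun h => by omega)
    have hB_sorted : (runs x 1 t).Pairwise (· ≥ ·) := hB_pair.imp (fun h => by omega)
    -- combine
    have hperm : (bpass^[odds.length] odds).Perm (runs x 1 t) := by
      apply hA_perm.trans
      rw [List.perm_ext_iff_of_nodup hodds_nodup hB_nodup]
      intro v
      rw [hodds_mem, hB_mem]
    exact hperm.eq_of_pairwise (fun a b _ _ h1 h2 => by omega) hA_sorted hB_sorted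

-- ===== VERDICT (by name: the statement is the Claim_ definition above) =====
theorem odd_count_elements_spec : Claim_equal_odd_count_elements := by
  intro list1 list2 _
  show odd_count_elements list1 list2 = odd_count_elements_alt list1 list2
  exact final_eq list1 list2
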